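-- pv_equiv track=rewrite | github.com/arknave/project-euler | python/pe150.py | gen_case
-- ===== SOURCE A (Python) =====
-- def s():
--     MASK = (1 << 20) - 1
--     OFFSET = 1 << 19
--     t = 0
--     while True:
--         t = (615949 * t + 797807) & MASK
--         yield t - OFFSET
--
-- def gen_case(n=1000):
--     table = []
--     gen = s()
--     for row_id in range(n):
--         row = []
--         for col in range(row_id + 1):
--             row.append(next(gen))
--
--         table.append(row)
--
--     return table
-- ===== SOURCE B (Python) =====
-- def s():
--     MASK = (1 << 20) - 1
--     OFFSET = 1 << 19
--     t = 0
--     while True: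
--         t = (615949 * t + 797807) & MASK
--         yield t - OFFSET
--
-- def gen_case(n=1000):
--     gen = s()
--     total = n * (n + 1) // 2 if n > 0 else 0
--     flat = [next(gen) for _ in range(total)]
--     table = []
--     start = 0
--     for row_id in range(n):
--         table.append(flat[start:start + row_id + 1])
--         start += row_id + 1
--     return table
-- ===== Notes on version B (the rewrite author's own statement) =====
-- stated objective: alternative
-- what changed: Instead of drawing PRNG values row by row inside a nested loop, B first computes the triangular total count, draws that many values into one flat list in a single pass, and then builds the table in a second pass by slicing the flat list at running offsets.
import Mathlib
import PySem

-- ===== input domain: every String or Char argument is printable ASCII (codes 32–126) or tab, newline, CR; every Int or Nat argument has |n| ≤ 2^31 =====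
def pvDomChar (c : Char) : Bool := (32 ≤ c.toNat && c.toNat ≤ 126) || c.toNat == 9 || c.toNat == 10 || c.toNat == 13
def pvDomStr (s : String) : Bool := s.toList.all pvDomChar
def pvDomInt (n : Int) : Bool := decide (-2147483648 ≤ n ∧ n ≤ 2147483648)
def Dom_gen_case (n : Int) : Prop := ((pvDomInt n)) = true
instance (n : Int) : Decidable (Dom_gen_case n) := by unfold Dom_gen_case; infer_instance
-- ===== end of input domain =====

-- B draws all n*(n+1)//2 PRNG values into one flat list first, then slices it into rows;
-- A interleaves drawing and row building.  Same values, different decomposition ("alternative").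

-- ===== PORT A =====
-- one step of the generator s(): t = (615949*t + 797807) & MASK  (t stays nonnegative, so & = land)
def pvNext (t : Int) : Int := Int.land (615949 * t + 797807) 1048575

def gen_case (n : Int) : List (List Int) :=
  ((PySem.List.pyRange 0 n 1).foldl
    (fun (st : Int × List (List Int)) row_id =>
      let inner := (PySem.List.pyRange 0 (row_id + 1) 1).foldl
        (fun (st2 : Int × List Int) _ =>
          let t' := pvNext st2.1
          (t', st2.2 ++ [t' - 524288]))
        (st.1, ([] : List Int))
      (inner.1, st.2 ++ [inner.2]))
    (0, ([] : List (List Int)))).2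

-- ===== PORT B =====
-- flat = [next(gen) for _ in range(total)] : draw k values starting from PRNG state t
-- (tail-recursive: values accumulated in reverse, then reversed once)
def pvDrawRev : Nat → Int → List Int → List Int
  | 0, _, acc => acc
  | k + 1, t, acc => pvDrawRev k (pvNext t) ((pvNext t - 524288) :: acc)

def gen_case_alt (n : Int) : List (List Int) :=
  let total := if 0 < n then PySem.Int.floordiv (n * (n + 1)) 2 else 0
  let flat := (pvDrawRev total.toNat 0 []).reverse
  ((PySem.List.pyRange 0 n 1).foldl
    (fun (st : Int × List (List Int)) row_id =>
      (st.1 + (row_id + 1),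
       st.2 ++ [PySem.List.slice flat (some st.1) (some (st.1 + (row_id + 1)))]))
    (0, ([] : List (List Int)))).2

-- ===== PRECONDITION & SPEC =====
def Spec_gen_case (n : Int) (out : List (List Int)) : Prop := out = gen_case_alt n
instance (n : Int) (out : List (List Int)) : Decidable (Spec_gen_case n out) := by unfold Spec_gen_case; infer_instance

-- ===== CLAIM (what is proved, stated in full; the proofs are below) =====
def Claim_equal_gen_case : Prop := ∀ (n : Int), Dom_gen_case n → Spec_gen_case n (gen_case n)

-- ===== LEMMAS AND PROOFS =====

-- the flat draw list, written directly (pvDrawRev builds its reverse)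
def pvDraw : Nat → Int → List Int
  | 0, _ => []
  | k + 1, t => (pvNext t - 524288) :: pvDraw k (pvNext t)

theorem pvDrawRev_eq (k : Nat) (t : Int) (acc : List Int) :
    pvDrawRev k t acc = (pvDraw k t).reverse ++ acc := by
  induction k generalizing t acc with
  | zero => simp [pvDrawRev, pvDraw]
  | succ k ih => simp [pvDrawRev, pvDraw, ih]

-- PRNG state after k steps
def pvState : Nat → Int → Int
  | 0, t => t
  | k + 1, t => pvState k (pvNext t)

-- triangular number, recursively
def pvT : Nat → Nat
  | 0 => 0
  | m + 1 => pvT m + (m + 1)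

-- the common reference table
def pvTbl : Nat → List (List Int)
  | 0 => []
  | m + 1 => pvTbl m ++ [pvDraw (m + 1) (pvState (pvT m) 0)]

theorem pvDraw_length (k : Nat) (t : Int) : (pvDraw k t).length = k := by
  induction k generalizing t with
  | zero => rfl
  | succ k ih => simp [pvDraw, ih]

theorem pvState_add (a b : Nat) (t : Int) : pvState (a + b) t = pvState b (pvState a t) := by
  induction a generalizing t with
  | zero => simp [pvState]
  | succ a ih => rw [Nat.succ_add]; simp [pvState, ih]

theorem pvDraw_add (a b : Nat) (t : Int) :
    pvDraw (a + b) t = pvDraw a t ++ pvDraw b (pvState a t) := by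
  induction a generalizing t with
  | zero => simp [pvDraw, pvState]
  | succ a ih => rw [Nat.succ_add]; simp [pvDraw, pvState, ih]

theorem pvDraw_drop (a b : Nat) (t : Int) :
    (pvDraw (a + b) t).drop a = pvDraw b (pvState a t) := by
  rw [pvDraw_add, List.drop_append_of_le_length (by simp [pvDraw_length])]
  simp [pvDraw_length]

theorem pvDraw_take (a b : Nat) (t : Int) : (pvDraw (a + b) t).take a = pvDraw a t := by
  rw [pvDraw_add, List.take_append_of_le_length (by simp [pvDraw_length])]
  simp [pvDraw_length]

-- A's inner loop over any list (the element is ignored): it draws l.length values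
theorem innerA (l : List Int) (t : Int) (acc : List Int) :
    l.foldl (fun (st2 : Int × List Int) _ =>
        let t' := pvNext st2.1
        (t', st2.2 ++ [t' - 524288])) (t, acc)
      = (pvState l.length t, acc ++ pvDraw l.length t) := by
  induction l generalizing t acc with
  | nil => simp [pvState, pvDraw]
  | cons x xs ih => simp [List.foldl_cons, ih, pvState, pvDraw]

-- A's outer loop
theorem foldA (m : Nat) :
    (PySem.List.pyRange 0 (m : Int) 1).foldl
      (fun (st : Int × List (List Int)) row_id =>
        let inner := (PySem.List.pyRange 0 (row_id + 1) 1).foldl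
          (fun (st2 : Int × List Int) _ =>
            let t' := pvNext st2.1
            (t', st2.2 ++ [t' - 524288]))
          (st.1, ([] : List Int))
        (inner.1, st.2 ++ [inner.2]))
      (0, ([] : List (List Int)))
      = (pvState (pvT m) 0, pvTbl m) := by
  induction m with
  | zero => simp [PySem.List.pyRange_one_eq_nil, pvState, pvT, pvTbl]
  | succ m ih =>
    have hsplit : PySem.List.pyRange 0 ((m + 1 : Nat) : Int) 1
        = PySem.List.pyRange 0 (m : Int) 1 ++ [(m : Int)] := by
      push_cast
      rw [PySem.List.pyRange_one_succ_right (by positivity)]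
    rw [hsplit, List.foldl_append, ih]
    simp only [List.foldl_cons, List.foldl_nil]
    rw [innerA]
    have hlen : (PySem.List.pyRange 0 ((m : Int) + 1) 1).length = m + 1 := by
      rw [PySem.List.length_pyRange_one]; omega
    rw [hlen]
    rw [show pvTbl (m + 1) = pvTbl m ++ [pvDraw (m + 1) (pvState (pvT m) 0)] from rfl,
        show pvT (m + 1) = pvT m + (m + 1) from rfl, pvState_add (pvT m) (m + 1)]
    simp

-- B's slicing loop, over a flat list of draws long enough for m rows
theorem foldB (m L : Nat) (h : pvT m ≤ L) :
    (PySem.List.pyRange 0 (m : Int) 1).foldl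
      (fun (st : Int × List (List Int)) row_id =>
        (st.1 + (row_id + 1),
         st.2 ++ [PySem.List.slice (pvDraw L 0) (some st.1) (some (st.1 + (row_id + 1)))]))
      (0, ([] : List (List Int)))
      = ((pvT m : Int), pvTbl m) := by
  induction m with
  | zero => simp [PySem.List.pyRange_one_eq_nil, pvT, pvTbl]
  | succ m ih =>
    have hm : pvT m ≤ L := le_trans (Nat.le_add_right _ _) h
    have hsplit : PySem.List.pyRange 0 ((m + 1 : Nat) : Int) 1
        = PySem.List.pyRange 0 (m : Int) 1 ++ [(m : Int)] := by
      push_cast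
      rw [PySem.List.pyRange_one_succ_right (by positivity)]
    rw [hsplit, List.foldl_append, ih hm]
    simp only [List.foldl_cons, List.foldl_nil]
    have hcast : ((pvT m : Nat) : Int) + ((m : Int) + 1) = ((pvT m : Nat) : Int) + ((m + 1 : Nat) : Int) := by
      push_cast; ring
    rw [hcast, PySem.List.slice_natCast_add]
    have hL : L = pvT m + ((m + 1) + (L - pvT (m + 1))) := by
      have : pvT (m + 1) = pvT m + (m + 1) := rfl
      omega
    rw [hL, pvDraw_drop, pvDraw_take]
    simp only [Prod.mk.injEq]
    refine ⟨?_, ?_⟩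
    · push_cast [show pvT (m + 1) = pvT m + (m + 1) from rfl]; ring
    · rfl

theorem pvT_closed (m : Nat) : pvT m = m * (m + 1) / 2 := by
  induction m with
  | zero => rfl
  | succ m ih =>
    have h2 : (m + 1) * (m + 1 + 1) = m * (m + 1) + 2 * (m + 1) := by ring
    simp only [pvT, ih]
    omega

theorem total_eq (m : Nat) :
    (PySem.Int.floordiv ((m : Int) * ((m : Int) + 1)) 2).toNat = pvT m := by
  have h : (m : Int) * ((m : Int) + 1) = ((m * (m + 1) : Nat) : Int) := by push_cast; ring
  have h2 := PySem.Int.floordiv_natCast (m * (m + 1)) 2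
  rw [(by norm_num : (((2 : Nat) : Int)) = (2 : Int))] at h2
  rw [h, h2, pvT_closed]
  simp
  omega

-- ===== VERDICT (by name: the statement is the Claim_ definition above) =====
theorem gen_case_spec : Claim_equal_gen_case := by
  intro n _
  unfold Spec_gen_case gen_case gen_case_alt
  by_cases hn : n ≤ 0
  · rw [PySem.List.pyRange_one_eq_nil hn]
    simp
  · have hm : n = ((n.toNat : Nat) : Int) := by omega
    rw [hm]
    rw [if_pos (show (0 : Int) < ((n.toNat : Nat) : Int) by omega)]
    simp only [pvDrawRev_eq, List.append_nil, List.reverse_reverse]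
    rw [foldA, total_eq, foldB n.toNat (pvT n.toNat) le_rfl]
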